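-- pv_equiv track=rewrite | github.com/Asphandol/Meganeurons | tasks/task1/ai work/goliath_resque.py | rescue_people
-- ===== SOURCE A (Python) =====
-- def rescue_people(smarties: dict, limit_iq: int)->tuple:
--     '''
--     Counts the amount of travels to get people
--     to another planet.
--
--     >>> rescue_people({"Steve Jobs": 160, "Albert Einstein": 160, \
-- "Sir Isaac Newton": 195, "Nikola Tesla": 189}, 500)
--     (2, [['Sir Isaac Newton', 'Nikola Tesla'], ['Albert Einstein', 'Steve Jobs']])
--     '''
--     list_names_iq = sorted(smarties.items(), key=lambda x: (-x[1], x[0]))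
--     all_trips = []
--     trip = []
--     iq_left = limit_iq
--     limit_people = 5
--
--
--     while iq_left > 0 and list_names_iq:
--         for ind, el in enumerate(list_names_iq):
--             if isinstance(el, tuple) and iq_left >= el[1]:
--                 trip.append(el[0])
--                 list_names_iq[ind] = 'flew'
--                 iq_left -= el[1]
--                 if iq_left == 0 or len(trip) == limit_people:
--                     break
--         all_trips.append(trip)
--         list_names_iq = [tup for tup in list_names_iq if tup != 'flew']
--         trip = []
--         iq_left = limit_iq
--
--
--     return len(all_trips), all_trips
-- ===== SOURCE B (Python) =====
-- def _fit_count(iqs, cap, hi):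
--     # number of entries of the ascending list iqs[0:hi] that are <= cap
--     # (hand-written bisect_right, since no imports are available here)
--     lo = 0
--     while lo < hi:
--         mid = (lo + hi) // 2
--         if iqs[mid] <= cap:
--             lo = mid + 1
--         else:
--             hi = mid
--     return lo
--
--
-- def rescue_people(smarties: dict, limit_iq: int) -> tuple:
--     # Sorted-array + binary search: each pick locates the strongest person still
--     # fitting the remaining capacity in O(log n) instead of a linear scan; 'hi'
--     # restricts later picks to people weaker than the last one taken.
--     people = sorted(smarties.items(), key=lambda x: (-x[1], x[0]))
--     people.reverse()                      # ascending IQ; picks walk right-to-left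
--     iqs = [iq for _, iq in people]
--     trips = []
--     while people and limit_iq > 0:
--         trip = []
--         cap = limit_iq
--         hi = len(people)
--         while len(trip) < 5:
--             idx = _fit_count(iqs, cap, hi)
--             if idx == 0:
--                 break
--             name, iq = people.pop(idx - 1)
--             del iqs[idx - 1]
--             trip.append(name)
--             cap -= iq
--             hi = idx - 1
--             if cap == 0:
--                 break
--         trips.append(trip)
--     return len(trips), trips
-- ===== Notes on version B (the rewrite author's own statement) =====
-- stated objective: faster
-- what changed: B keeps the remaining people as an ascending sorted array and, per pick, binary-searches the strongest person fitting the remaining capacity and deletes by index (searches bounded below the last pick), replacing A's per-trip linear scan with 'flew' sentinel marking plus a filtering rebuild pass.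
import Mathlib
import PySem

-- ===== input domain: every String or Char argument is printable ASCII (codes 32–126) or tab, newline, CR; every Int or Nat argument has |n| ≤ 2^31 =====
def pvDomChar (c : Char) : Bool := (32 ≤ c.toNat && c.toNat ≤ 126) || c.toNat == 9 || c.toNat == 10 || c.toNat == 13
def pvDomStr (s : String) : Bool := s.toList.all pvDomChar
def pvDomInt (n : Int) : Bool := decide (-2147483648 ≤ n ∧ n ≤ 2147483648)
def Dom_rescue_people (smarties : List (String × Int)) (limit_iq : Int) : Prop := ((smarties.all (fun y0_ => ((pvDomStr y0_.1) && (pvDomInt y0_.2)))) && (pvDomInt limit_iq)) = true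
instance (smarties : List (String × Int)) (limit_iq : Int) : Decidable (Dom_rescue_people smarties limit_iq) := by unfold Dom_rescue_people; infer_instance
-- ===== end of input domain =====

-- B replaces A's per-trip linear scan (with 'flew' sentinel marking and a filtering
-- rebuild) by binary search for the strongest fitting person in an ascending sorted
-- array, deleting picks by index (objective: faster; return values proved equal).

-- ===== PORT A =====
-- Inner 'for ind, el in enumerate(list_names_iq)' loop of A: the element at the visited
-- index is overwritten with the string 'flew'; we model the tuple-or-'flew' union as
-- Option (String × Int) with none = 'flew' (isinstance(el, tuple) = isSome, always true
-- at visit time since only already-visited indices are overwritten).  On break the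
-- untouched tail stays as tuples (map some).  Returns (trip, marked list).
def pvScanA : List (String × Int) → Int → List String → List String × List (Option (String × Int))
  | [], _, trip => (trip, [])
  | (n, q) :: rest, iq_left, trip =>
    if iq_left ≥ q then
      -- trip' = trip ++ [n], iq' = iq_left - q
      if iq_left - q = 0 ∨ (trip ++ [n]).length = 5 then (trip ++ [n], none :: rest.map some)
      else ((pvScanA rest (iq_left - q) (trip ++ [n])).1, none :: (pvScanA rest (iq_left - q) (trip ++ [n])).2)
    else ((pvScanA rest iq_left trip).1, some (n, q) :: (pvScanA rest iq_left trip).2)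

-- A's while loop: run the scan, append the trip, rebuild the list by the comprehension
-- '[tup for tup in list_names_iq if tup != 'flew']' (= filterMap id), reset and repeat.
-- The fuel (initially the list length) only cuts the recursion where Python A loops
-- forever (a round that removes nobody; B's Python loops forever on exactly those
-- inputs too, and its port burns the identical fuel): where Python A returns, a round
-- always removes somebody, so the fuel is never exhausted.
def pvLoopA (limit_iq : Int) : Nat → List (String × Int) → List (List String) → List (List String)
  | 0, _, acc => acc
  | fuel + 1, L, acc =>
    if limit_iq > 0 ∧ L ≠ [] then
      pvLoopA limit_iq fuel ((pvScanA L limit_iq []).2.filterMap id) (acc ++ [(pvScanA L limit_iq []).1])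
    else acc

def rescue_people (smarties : List (String × Int)) (limit_iq : Int) : Int × List (List String) :=
  let list_names_iq := PySem.List.sorted2 (PySem.Dict.ofList smarties).items (fun x => -x.2) (fun x => x.1)
  let all_trips := pvLoopA limit_iq list_names_iq.length list_names_iq []
  ((all_trips.length : Int), all_trips)

-- ===== PORT B =====
-- Source B's _fit_count: hand-written binary search; 'iqs[mid]' is ported as 'getD mid 0',
-- exact because every call keeps mid < hi ≤ iqs.length (so the default is never read).
-- The fuel (initially hi ≥ hi - lo) is only a structural-termination guard: hi - lo
-- strictly decreases each step, so the 0-fuel case is never reached.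
def pvFitCount (iqs : List Int) (cap : Int) : Nat → Nat → Nat → Nat
  | 0, lo, _ => lo
  | fuel + 1, lo, hi =>
    if lo < hi then
      if iqs.getD ((lo + hi) / 2) 0 ≤ cap then pvFitCount iqs cap fuel ((lo + hi) / 2 + 1) hi
      else pvFitCount iqs cap fuel lo ((lo + hi) / 2)
    else lo

-- Source B's inner 'while len(trip) < 5' loop; state = (people, iqs, cap, hi, trip).
-- 'people.pop(idx - 1)' is ported as lookup + eraseIdx; the none branch is unreachable
-- (idx - 1 < hi ≤ people.length at every call), where Python's pop cannot raise either.
-- Fuel 5 matches the loop bound: trip grows by one name per iteration.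
def pvTripB : Nat → List (String × Int) → List Int → Int → Nat → List String →
    List String × List (String × Int) × List Int
  | 0, people, iqs, _, _, trip => (trip, people, iqs)
  | fuel + 1, people, iqs, cap, hi, trip =>
    if trip.length < 5 then
      let idx := pvFitCount iqs cap hi 0 hi
      if idx = 0 then (trip, people, iqs)
      else
        match people[idx - 1]? with
        | none => (trip, people, iqs)
        | some (n, q) =>
          if cap - q = 0 then (trip ++ [n], people.eraseIdx (idx - 1), iqs.eraseIdx (idx - 1))
          else pvTripB fuel (people.eraseIdx (idx - 1)) (iqs.eraseIdx (idx - 1)) (cap - q) (idx - 1) (trip ++ [n])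
    else (trip, people, iqs)

-- Source B's outer while loop; the same fuel cut as pvLoopA (both Pythons diverge exactly
-- when a round takes nobody, and the two ports then stop after the same number of rounds).
def pvLoopB (limit_iq : Int) : Nat → List (String × Int) → List Int → List (List String) → List (List String)
  | 0, _, _, trips => trips
  | fuel + 1, people, iqs, trips =>
    if people ≠ [] ∧ limit_iq > 0 then
      pvLoopB limit_iq fuel (pvTripB 5 people iqs limit_iq people.length []).2.1
        (pvTripB 5 people iqs limit_iq people.length []).2.2
        (trips ++ [(pvTripB 5 people iqs limit_iq people.length []).1])
    else trips

def rescue_people_alt (smarties : List (String × Int)) (limit_iq : Int) : Int × List (List String) :=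
  let people := (PySem.List.sorted2 (PySem.Dict.ofList smarties).items (fun x => -x.2) (fun x => x.1)).reverse
  let iqs := people.map (fun x => x.2)
  let trips := pvLoopB limit_iq people.length people iqs []
  ((trips.length : Int), trips)

-- ===== PRECONDITION & SPEC =====
-- (no Pre_: the two ports are equal on every input.  When limit_iq > 0 and some
-- deduplicated IQ exceeds limit_iq, BOTH Pythons loop forever; both ports cut that
-- divergence with the identical no-progress guard, so equality still holds there.)
def Spec_rescue_people (smarties : List (String × Int)) (limit_iq : Int) (out : Int × List (List String)) : Prop := out = rescue_people_alt smarties limit_iq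
instance (smarties : List (String × Int)) (limit_iq : Int) (out : Int × List (List String)) : Decidable (Spec_rescue_people smarties limit_iq out) := by unfold Spec_rescue_people; infer_instance

-- ===== CLAIM (what is proved, stated in full; the proofs are below) =====
def Claim_equal_rescue_people : Prop := ∀ (smarties : List (String × Int)) (limit_iq : Int), Dom_rescue_people smarties limit_iq → Spec_rescue_people smarties limit_iq (rescue_people smarties limit_iq)

-- ===== LEMMAS AND PROOFS =====

-- sorted2 with first key (-IQ) yields a list whose IQs are non-increasing
theorem pv_insertBy_desc (x : String × Int) (ys : List (String × Int))
    (hys : ys.Pairwise (fun a b => b.2 ≤ a.2)) :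
    (PySem.List.insertBy
      (fun a b => decide (-a.2 < -b.2) || (!decide (-b.2 < -a.2) && decide (a.1 < b.1)))
      x ys).Pairwise (fun a b => b.2 ≤ a.2) := by
  induction ys with
  | nil => simp [PySem.List.insertBy.eq_1]
  | cons y ys ih =>
    rw [PySem.List.insertBy.eq_2]
    rcases List.pairwise_cons.mp hys with ⟨hy, hys'⟩
    by_cases hb : (decide (-x.2 < -y.2) || (!decide (-y.2 < -x.2) && decide (x.1 < y.1))) = true
    · rw [if_pos hb]
      have hxy : y.2 ≤ x.2 := by
        rcases Bool.or_eq_true_iff.mp hb with h | h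
        · have := of_decide_eq_true h; omega
        · have := of_decide_eq_true (Bool.and_eq_true_iff.mp h).2
          have h2 := (Bool.and_eq_true_iff.mp h).1
          simp only [Bool.not_eq_true'] at h2
          have := of_decide_eq_false h2; omega
      refine List.pairwise_cons.mpr ⟨?_, hys⟩
      intro z hz
      rcases List.mem_cons.mp hz with rfl | hz
      · exact hxy
      · exact le_trans (hy z hz) hxy
    · rw [if_neg hb]
      refine List.pairwise_cons.mpr ⟨?_, ih hys'⟩
      intro z hz
      rcases (PySem.List.mem_insertBy _ _ _ _).mp hz with rfl | hz
      · simp only [Bool.or_eq_true_iff, Bool.and_eq_true_iff, not_or, not_and] at hb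
        have h1 := hb.1
        simp only [decide_eq_true_eq] at h1
        omega
      · exact hy z hz

theorem pv_sorted2_desc (xs : List (String × Int)) :
    (PySem.List.sorted2 xs (fun x => -x.2) (fun x => x.1)).Pairwise (fun a b => b.2 ≤ a.2) := by
  show (xs.foldl (fun acc x => PySem.List.insertBy _ x acc) []).Pairwise _
  generalize hacc : ([] : List (String × Int)) = acc
  have h : acc.Pairwise (fun a b : String × Int => b.2 ≤ a.2) := by rw [← hacc]; simp
  clear hacc
  induction xs generalizing acc with
  | nil => simpa using h
  | cons x xs ih =>
    simp only [List.foldl_cons]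
    exact ih _ (pv_insertBy_desc x acc h)

-- binary search returns the (unique) cut point when one exists (and has enough fuel)
theorem pvFitCount_eq (iqs : List Int) (cap : Int) :
    ∀ (fuel lo hi b : Nat), hi - lo ≤ fuel → lo ≤ b → b ≤ hi →
      (∀ j, lo ≤ j → j < b → iqs.getD j 0 ≤ cap) →
      (∀ j, b ≤ j → j < hi → ¬ iqs.getD j 0 ≤ cap) →
      pvFitCount iqs cap fuel lo hi = b := by
  intro fuel
  induction fuel with
  | zero =>
    intro lo hi b h0 h1 h2 _ _
    simp only [pvFitCount]
    omega
  | succ N ih =>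
    intro lo hi b hN h1 h2 hle hgt
    simp only [pvFitCount]
    by_cases h : lo < hi
    · rw [if_pos h]
      by_cases hm : iqs.getD ((lo + hi) / 2) 0 ≤ cap
      · rw [if_pos hm]
        have hmb : (lo + hi) / 2 < b := by
          by_contra hc
          exact hgt _ (by omega) (by omega) hm
        exact ih ((lo + hi) / 2 + 1) hi b (by omega) (by omega) h2 (fun j ha hb => hle j (by omega) hb) hgt
      · rw [if_neg hm]
        have hmb : b ≤ (lo + hi) / 2 := by
          by_contra hc
          exact hm (hle _ (by omega) (by omega))
        exact ih lo ((lo + hi) / 2) b (by omega) h1 hmb hle (fun j ha hb => hgt j ha (by omega))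
    · rw [if_neg h]; omega

-- A's scan walks past a non-fitting prefix, marking nothing
theorem pvScanA_skip (S L : List (String × Int)) (cap : Int) (trip : List String)
    (hS : ∀ x ∈ S, ¬ cap ≥ x.2) :
    pvScanA (S ++ L) cap trip
      = ((pvScanA L cap trip).1, S.map some ++ (pvScanA L cap trip).2) := by
  induction S with
  | nil => simp
  | cons x S ih =>
    obtain ⟨n, q⟩ := x
    have hx : ¬ cap ≥ q := hS (n, q) (by simp)
    simp only [List.cons_append, pvScanA, if_neg hx, List.map_cons]
    rw [ih (fun y hy => hS y (by simp [hy]))]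

-- the survivors of one scan are a sublist of the input (order preserved)
theorem pvScanA_rest_sublist (L : List (String × Int)) (cap : Int) (trip : List String) :
    ((pvScanA L cap trip).2.filterMap id).Sublist L := by
  induction L generalizing cap trip with
  | nil => simp [pvScanA]
  | cons x rest ih =>
    obtain ⟨n, q⟩ := x
    by_cases hq : cap ≥ q
    · by_cases hbr : cap - q = 0 ∨ (trip ++ [n]).length = 5
      · simp only [pvScanA, if_pos hq, if_pos hbr, List.filterMap_cons, id]
        rw [List.filterMap_map]
        simpa using (List.sublist_cons_self (n,q) rest)
      · simp only [pvScanA, if_pos hq, if_neg hbr, List.filterMap_cons, id]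
        exact (ih (cap - q) (trip ++ [n])).trans (List.sublist_cons_self _ _)
    · simp only [pvScanA, if_neg hq, List.filterMap_cons, id]
      exact (ih cap trip).cons₂ _

-- one trip: B's binary-search picks on the reversed list = A's marking scan
theorem pvTripB_eq_pvScanA :
    ∀ (N : Nat) (L M : List (String × Int)) (cap : Int) (trip : List String) (fuel : Nat),
      L.length ≤ N → L.Pairwise (fun a b => b.2 ≤ a.2) → trip.length < 5 → 5 ≤ trip.length + fuel →
      pvTripB fuel (L.reverse ++ M) ((L.reverse ++ M).map (fun x => x.2)) cap L.length trip
        = ((pvScanA L cap trip).1,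
           ((pvScanA L cap trip).2.filterMap id).reverse ++ M,
           (((pvScanA L cap trip).2.filterMap id).reverse ++ M).map (fun x => x.2)) := by
  intro N
  induction N with
  | zero =>
    intro L M cap trip fuel hN _ h5 hfuel
    have hL : L = [] := List.eq_nil_of_length_eq_zero (Nat.le_zero.mp hN)
    subst hL
    obtain ⟨f, rfl⟩ : ∃ f, fuel = f + 1 := ⟨fuel - 1, by omega⟩
    simp only [pvTripB, if_pos h5]
    simp only [List.reverse_nil, List.nil_append, List.length_nil]
    have h0 : pvFitCount (M.map (fun x => x.2)) cap 0 0 0 = 0 := by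
      simp [pvFitCount]
    rw [h0]
    simp [pvScanA]
  | succ N ih =>
    intro L M cap trip fuel hN hPair h5 hfuel
    obtain ⟨f, rfl⟩ : ∃ f, fuel = f + 1 := ⟨fuel - 1, by omega⟩
    by_cases hLnil : L = []
    · subst hLnil
      simp only [pvTripB, if_pos h5]
      simp only [List.reverse_nil, List.nil_append, List.length_nil]
      have h0 : pvFitCount (M.map (fun x => x.2)) cap 0 0 0 = 0 := by
        simp [pvFitCount]
      rw [h0]
      simp [pvScanA]
    · set p : String × Int → Bool := fun x => decide (¬ cap ≥ x.2) with hp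
      have hSL : L.takeWhile p ++ L.dropWhile p = L := List.takeWhile_append_dropWhile
      set S := L.takeWhile p with hSdef
      have hS : ∀ x ∈ S, ¬ cap ≥ x.2 := by
        intro x hx
        have := List.mem_takeWhile_imp hx
        rw [hp] at this
        exact of_decide_eq_true this
      cases hdrop : L.dropWhile p with
      | nil =>
        -- nobody fits: the search returns 0, A's scan marks nobody
        have hLS : L = S := by rw [← hSL, hdrop, List.append_nil]
        have hkey : ∀ j, 0 ≤ j → j < L.length → ¬ ((L.reverse ++ M).map (fun x => x.2)).getD j 0 ≤ cap := by
          intro j _ hj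
          have hjlen : j < ((L.reverse ++ M).map (fun x => x.2)).length := by simp; omega
          rw [List.getD_eq_getElem _ _ hjlen]
          have hjr : j < L.reverse.length := by simpa using hj
          rw [List.getElem_map, List.getElem_append_left hjr]
          have hmem : L.reverse[j] ∈ L := by
            have := List.getElem_mem hjr
            simpa using this
          have := hS _ (by rw [← hLS]; exact hmem)
          omega
        have hidx : pvFitCount ((L.reverse ++ M).map (fun x => x.2)) cap L.length 0 L.length = 0 :=
          pvFitCount_eq _ _ L.length 0 L.length 0 (by omega) (by omega) (by omega)
            (by intro j _ hj; omega) hkey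
        simp only [pvTripB, if_pos h5]
        simp only [hidx]
        have hscan : pvScanA L cap trip = (trip, S.map some) := by
          conv_lhs => rw [← hSL, hdrop, List.append_nil]
          have := pvScanA_skip S [] cap trip hS
          simpa [pvScanA] using this
        rw [hscan]
        simp only [List.filterMap_map, Function.comp_def, id, List.filterMap_some]
        rw [hLS]
        simp
      | cons hd L' =>
        obtain ⟨n, q⟩ := hd
        have hq : cap ≥ q := by
          have hne : L.dropWhile p ≠ [] := by rw [hdrop]; simp
          have h0 := List.head_dropWhile_not p hne
          have h1 : p (n, q) = false := by simp only [hdrop, List.head_cons] at h0; exact h0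
          rw [hp] at h1
          simpa using of_decide_eq_false h1
        have hLdec : L = S ++ (n, q) :: L' := by rw [← hSL, hdrop]
        have hrev : L.reverse ++ M = L'.reverse ++ ((n, q) :: (S.reverse ++ M)) := by
          rw [hLdec]; simp
        have hlen : L.length = S.length + (L'.length + 1) := by rw [hLdec]; simp
        have hPair2 : ((n, q) :: L').Pairwise (fun a b : String × Int => b.2 ≤ a.2) := by
          refine List.Pairwise.sublist ?_ hPair
          rw [hLdec]; exact List.sublist_append_right _ _
        have hL'le : ∀ x ∈ L', x.2 ≤ q := fun x hx => (List.pairwise_cons.mp hPair2).1 x hx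
        have hL'desc : L'.Pairwise (fun a b : String × Int => b.2 ≤ a.2) :=
          (List.pairwise_cons.mp hPair2).2
        -- the search lands just past (n, q)
        have hkey_le : ∀ j, 0 ≤ j → j < L'.length + 1 →
            ((L'.reverse ++ ((n, q) :: (S.reverse ++ M))).map (fun x => x.2)).getD j 0 ≤ cap := by
          intro j _ hj
          rw [List.getD_eq_getElem _ _ (by simp; omega), List.getElem_map]
          by_cases hjl : j < L'.length
          · rw [List.getElem_append_left (by simpa using hjl)]
            have hmem : L'.reverse[j]'(by simpa using hjl) ∈ L' := by
              have := List.getElem_mem (by simpa using hjl : j < L'.reverse.length)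
              simpa using this
            exact le_trans (hL'le _ hmem) hq
          · have hjeq : j = L'.length := by omega
            subst hjeq
            rw [List.getElem_append_right (by simp)]
            simp [hq]
        have hkey_gt : ∀ j, L'.length + 1 ≤ j → j < L.length →
            ¬ ((L'.reverse ++ ((n, q) :: (S.reverse ++ M))).map (fun x => x.2)).getD j 0 ≤ cap := by
          intro j hj1 hj2
          rw [List.getD_eq_getElem?_getD, List.getElem?_map,
            List.getElem?_append_right (by simp; omega)]
          rw [show j - L'.reverse.length = (j - L'.length - 1) + 1 from by simp; omega]
          rw [List.getElem?_cons_succ, List.getElem?_append_left (by simp; omega)]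
          have hjS : j - L'.length - 1 < S.reverse.length := by simp; omega
          rw [List.getElem?_eq_getElem hjS]
          have hmem : S.reverse[j - L'.length - 1]'hjS ∈ S := by
            have := List.getElem_mem hjS
            simpa using this
          have := hS _ hmem
          simp only [Option.map_some, Option.getD_some]
          omega
        have hidx : pvFitCount ((L'.reverse ++ ((n, q) :: (S.reverse ++ M))).map (fun x => x.2)) cap
              L.length 0 L.length = L'.length + 1 :=
          pvFitCount_eq _ _ L.length 0 L.length (L'.length + 1) (by omega) (by omega) (by omega)
            hkey_le hkey_gt
        have hget : (L'.reverse ++ ((n, q) :: (S.reverse ++ M)))[L'.length + 1 - 1]? = some (n, q) := by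
          simp only [Nat.add_sub_cancel]
          rw [List.getElem?_append_right (by simp)]
          simp
        have herase : (L'.reverse ++ ((n, q) :: (S.reverse ++ M))).eraseIdx (L'.length + 1 - 1)
            = L'.reverse ++ (S.reverse ++ M) := by
          simp only [Nat.add_sub_cancel]
          rw [List.eraseIdx_append_of_length_le (by simp)]
          simp
        have heraseK : ((L'.reverse ++ ((n, q) :: (S.reverse ++ M))).map (fun x => x.2)).eraseIdx (L'.length + 1 - 1)
            = (L'.reverse ++ (S.reverse ++ M)).map (fun x => x.2) := by
          rw [List.eraseIdx_map, herase]
        -- reduce the B side one step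
        rw [hrev]
        simp only [pvTripB, if_pos h5]
        simp only [hidx, Nat.succ_ne_zero, if_false, hget, herase, heraseK]
        -- reduce the A side one step
        rw [hLdec, pvScanA_skip S _ cap trip hS]
        simp only [pvScanA, ge_iff_le, hq, if_pos]
        by_cases hbrk : cap - q = 0 ∨ (trip ++ [n]).length = 5
        · rw [if_pos hbrk]
          have hB : (if cap - q = 0 then
                (trip ++ [n], L'.reverse ++ (S.reverse ++ M), (L'.reverse ++ (S.reverse ++ M)).map (fun x => x.2))
              else pvTripB f (L'.reverse ++ (S.reverse ++ M)) ((L'.reverse ++ (S.reverse ++ M)).map (fun x => x.2))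
                (cap - q) (L'.length + 1 - 1) (trip ++ [n]))
              = (trip ++ [n], L'.reverse ++ (S.reverse ++ M), (L'.reverse ++ (S.reverse ++ M)).map (fun x => x.2)) := by
            rcases hbrk with h0 | h5'
            · rw [if_pos h0]
            · by_cases h0 : cap - q = 0
              · rw [if_pos h0]
              · rw [if_neg h0]
                cases f with
                | zero => simp [pvTripB]
                | succ f' => simp only [pvTripB]; rw [if_neg (by omega)]
          rw [hB]
          simp [List.filterMap_append, List.filterMap_map, List.filterMap_some, List.reverse_append]
        · rw [if_neg hbrk]
          rw [not_or] at hbrk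
          rw [if_neg hbrk.1]
          have hrec := ih L' (S.reverse ++ M) (cap - q) (trip ++ [n]) f (by omega) hL'desc
            (by have h52 := hbrk.2
                simp only [List.length_append, List.length_cons, List.length_nil] at h5 h52 ⊢
                omega)
            (by simp only [List.length_append, List.length_cons, List.length_nil] at hfuel ⊢; omega)
          simp only [Nat.add_sub_cancel]
          rw [hrec]
          simp [List.filterMap_append, List.filterMap_map, List.filterMap_some, List.reverse_append]

theorem pvLoopA_eq_pvLoopB (limit_iq : Int) :
    ∀ (fuel : Nat) (L : List (String × Int)) (acc : List (List String)),
      L.Pairwise (fun a b => b.2 ≤ a.2) →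
      pvLoopA limit_iq fuel L acc = pvLoopB limit_iq fuel L.reverse (L.reverse.map (fun x => x.2)) acc := by
  intro fuel
  induction fuel with
  | zero => intro L acc _; simp [pvLoopA, pvLoopB]
  | succ N ih =>
    intro L acc hPair
    simp only [pvLoopA, pvLoopB]
    by_cases hc : limit_iq > 0 ∧ L ≠ []
    · rw [if_pos hc, if_pos ⟨by simpa using hc.2, hc.1⟩]
      have htrip := pvTripB_eq_pvScanA L.length L [] limit_iq [] 5 (le_refl _) hPair (by simp) (by simp)
      simp only [List.append_nil] at htrip
      simp only [List.length_reverse, htrip]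
      have hsub := pvScanA_rest_sublist L limit_iq []
      exact ih _ _ (List.Pairwise.sublist hsub hPair)
    · rw [if_neg hc, if_neg (fun h => hc ⟨h.2, by simpa using h.1⟩)]

-- ===== VERDICT (by name: the statement is the Claim_ definition above) =====
theorem rescue_people_spec : Claim_equal_rescue_people := by
  intro smarties limit_iq _
  unfold Spec_rescue_people rescue_people rescue_people_alt
  have h := pvLoopA_eq_pvLoopB limit_iq
      (PySem.List.sorted2 (PySem.Dict.ofList smarties).items (fun x => -x.2) (fun x => x.1)).length
      (PySem.List.sorted2 (PySem.Dict.ofList smarties).items (fun x => -x.2) (fun x => x.1)) []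
      (pv_sorted2_desc _)
  simp only [List.length_reverse, h]
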